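-- pv_equiv track=rewrite | github.com/MrDrotik/humanize-calculator | latin_assembler.py | number_name_assemble
-- ===== SOURCE A (Python) =====
-- unique_numbers = {
--     0: '', 1: 'ten', 2: 'hundred', 3: 'thousand', 6: 'million', 9: 'billion',
--     12: 'trillion', 15: 'quadrillion', 18: 'quintillion', 21: 'sextillion',
--     24: 'septillion', 27: 'octillion', 30: 'nonillion'
-- }
--
-- latin_digit_prefix = (
--     '', 'un', 'duo', 'tre', 'quattuor', 'quin',
--     'sex', 'septen', 'octo', 'novem'
-- )
--
-- latin_tens_name = (
--     '', 'dez', 'vigint', 'trigint', 'quadragint', 'quinquagint', 'sexagint',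
--     'septuagint', 'octogint', 'nonagint'
-- )
--
-- alternative_ten_number_name = 'dec'
--
-- latin_hundreds_names = (
--     '', 'cent', 'ducent', 'trecent', 'quadringent', 'quingent', 'sescent',
--     'septingent', 'octingent', 'nongent'
-- )
--
-- latin_thousands_name = (
--     '', 'millia', 'duomillia', 'tremillia', 'quattuormillia',
--     'quinquemillia', 'sexmillia', 'septemmillia', 'octomillia', 'novemmillia'
-- )
--
-- def number_name_assemble(count_of_zeros):
--
--     if count_of_zeros in unique_numbers:
--         return unique_numbers[count_of_zeros]
--
--     assert isinstance(count_of_zeros, int) or \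
--         not count_of_zeros % 3 or \
--         not count_of_zeros < 0 or \
--         not count_of_zeros > 1200
--
--     out_str = ''
--     latin_number = (count_of_zeros - 3) / 3
--     latin_number = int(latin_number)
--     latin_number = str(latin_number)
--     latin_number = latin_number[-1::-1]
--     iteration = 0
--     for digit in latin_number:
--         iteration += 1
--         digit = int(digit)
--         local_iteration = iteration % 3
--
--         if local_iteration == 1:
--             if iteration > 1:
--                 if digit == 0:
--                     out_str = latin_thousands_name[1] + out_str
--                 else:
--                     out_str = latin_thousands_name[digit] + out_str
--
--         elif local_iteration == 2:
--             if iteration == 2 and count_of_zeros <= 60: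
--                 tens_for_injection = alternative_ten_number_name
--             else:
--                 tens_for_injection = latin_tens_name[digit]
--             out_str = latin_digit_prefix[previous_digit] + tens_for_injection + out_str
--
--         elif local_iteration == 0:
--             out_str = latin_hundreds_names[digit] + out_str
--
--         previous_digit = digit
--     return out_str + 'illion'
-- ===== SOURCE B (Python) =====
-- unique_numbers = {
--     0: '', 1: 'ten', 2: 'hundred', 3: 'thousand', 6: 'million', 9: 'billion',
--     12: 'trillion', 15: 'quadrillion', 18: 'quintillion', 21: 'sextillion',
--     24: 'septillion', 27: 'octillion', 30: 'nonillion'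
-- }
--
-- latin_digit_prefix = (
--     '', 'un', 'duo', 'tre', 'quattuor', 'quin',
--     'sex', 'septen', 'octo', 'novem'
-- )
--
-- latin_tens_name = (
--     '', 'dez', 'vigint', 'trigint', 'quadragint', 'quinquagint', 'sexagint',
--     'septuagint', 'octogint', 'nonagint'
-- )
--
-- alternative_ten_number_name = 'dec'
--
-- latin_hundreds_names = (
--     '', 'cent', 'ducent', 'trecent', 'quadringent', 'quingent', 'sescent',
--     'septingent', 'octingent', 'nongent'
-- )
--
-- latin_thousands_name = (
--     '', 'millia', 'duomillia', 'tremillia', 'quattuormillia',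
--     'quinquemillia', 'sexmillia', 'septemmillia', 'octomillia', 'novemmillia'
-- )
--
--
-- def number_name_assemble(count_of_zeros):
--     if count_of_zeros in unique_numbers:
--         return unique_numbers[count_of_zeros]
--     # digits of the Latin group number, least-significant first
--     digits = [int(ch) for ch in reversed(str((count_of_zeros - 3) // 3))]
--     pieces = []
--     for start in range(0, len(digits), 3):
--         g = digits[start:start + 3]
--         grp = start // 3
--         piece = ''
--         if len(g) == 3:
--             piece += latin_hundreds_names[g[2]]
--         if len(g) >= 2:
--             if grp == 0 and count_of_zeros <= 60:
--                 tens = alternative_ten_number_name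
--             else:
--                 tens = latin_tens_name[g[1]]
--             piece += latin_digit_prefix[g[0]] + tens
--         if grp > 0:
--             piece += latin_thousands_name[g[0] or 1]
--         pieces.append(piece)
--     return ''.join(reversed(pieces)) + 'illion'
-- ===== Notes on version B (the rewrite author's own statement) =====
-- stated objective: alternative
-- what changed: A walks the reversed digit string one character at a time with a position counter mod 3 and a carried previous_digit, prepending fragments to the output; B chunks the digit list into groups of three and assembles each group's name piece independently (hundreds + prefix + tens + thousands marker), joining the pieces most-significant group first.
import Mathlib
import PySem

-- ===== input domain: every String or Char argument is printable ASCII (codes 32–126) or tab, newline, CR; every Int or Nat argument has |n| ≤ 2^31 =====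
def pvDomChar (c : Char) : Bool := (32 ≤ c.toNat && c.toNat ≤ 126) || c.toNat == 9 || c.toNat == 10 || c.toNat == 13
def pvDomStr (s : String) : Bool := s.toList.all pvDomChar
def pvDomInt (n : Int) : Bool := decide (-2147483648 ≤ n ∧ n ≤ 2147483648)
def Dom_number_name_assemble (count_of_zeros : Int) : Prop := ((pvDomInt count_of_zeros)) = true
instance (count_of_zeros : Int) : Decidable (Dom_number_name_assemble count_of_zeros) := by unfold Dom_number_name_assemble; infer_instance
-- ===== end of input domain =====

-- B replaces A's single reversed-digit loop (position counter mod 3 + carried previous_digit)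
-- by chunking the digit list into groups of three and assembling each group's name piece
-- independently, concatenated most-significant group first (objective: alternative decomposition).
-- Both programs raise ValueError for negative inputs (the '-' character), excluded by Pre_.

-- shared module-level constants of the Python file
def uniqueNumbers : PySem.Dict Int String := PySem.Dict.ofList
  [(0, ""), (1, "ten"), (2, "hundred"), (3, "thousand"), (6, "million"), (9, "billion"),
   (12, "trillion"), (15, "quadrillion"), (18, "quintillion"), (21, "sextillion"),
   (24, "septillion"), (27, "octillion"), (30, "nonillion")]

def latinDigitPrefix : List String :=
  ["", "un", "duo", "tre", "quattuor", "quin", "sex", "septen", "octo", "novem"]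

def latinTensName : List String :=
  ["", "dez", "vigint", "trigint", "quadragint", "quinquagint", "sexagint",
   "septuagint", "octogint", "nonagint"]

def alternativeTenNumberName : String := "dec"

def latinHundredsNames : List String :=
  ["", "cent", "ducent", "trecent", "quadringent", "quingent", "sescent",
   "septingent", "octingent", "nongent"]

def latinThousandsName : List String :=
  ["", "millia", "duomillia", "tremillia", "quattuormillia",
   "quinquemillia", "sexmillia", "septemmillia", "octomillia", "novemmillia"]

-- tuple[index] for an index that is always a digit 0..9 at runtime
def tblGet (l : List String) (i : Int) : String := (PySem.List.pyGet? l i).getD ""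

-- int(ch) for a single digit character (A raises ValueError on '-'; excluded by Pre_)
def digitVal (ch : Char) : Int := (ch.toNat : Int) - 48

-- ===== PORT A =====
-- A's for-loop over the reversed digit string, state = (iteration, previous_digit, out_str)
def aLoop (count_of_zeros : Int) (cs : List Char) (iteration prev : Int) (out : String) : String :=
  match cs with
  | [] => out
  | ch :: rest =>
    let iteration := iteration + 1
    let digit := digitVal ch
    let localIteration := PySem.Int.mod iteration 3
    let out :=
      if localIteration == 1 then
        if iteration > 1 then
          if digit == 0 then tblGet latinThousandsName 1 ++ out
          else tblGet latinThousandsName digit ++ out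
        else out
      else if localIteration == 2 then
        let tensForInjection :=
          if iteration == 2 && count_of_zeros ≤ 60 then alternativeTenNumberName
          else tblGet latinTensName digit
        tblGet latinDigitPrefix prev ++ tensForInjection ++ out
      else if localIteration == 0 then
        tblGet latinHundredsNames digit ++ out
      else out
    aLoop count_of_zeros rest iteration digit out

def number_name_assemble (count_of_zeros : Int) : String :=
  match PySem.Dict.get? uniqueNumbers count_of_zeros with
  | some v => v
  | none =>
    -- int((count_of_zeros - 3) / 3): for count_of_zeros ≥ 0 (Pre_) the float division
    -- truncates to exactly the integer floor quotient (numerator ≥ 1, well within 2^53)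
    let latinNumber := PySem.Int.floordiv (count_of_zeros - 3) 3
    -- str(...)[-1::-1]: the reversed character list of str(latinNumber)
    let rev := (PySem.Int.toChars latinNumber).reverse
    aLoop count_of_zeros rev 0 0 "" ++ "illion"

-- ===== PORT B =====
-- one name piece per group of (up to) three digits, least-significant group first
def bPieces (count_of_zeros : Int) (grp : Nat) (ds : List Int) : List String :=
  match ds with
  | [] => []
  | [u] => [(if grp > 0 then tblGet latinThousandsName (if u == 0 then 1 else u) else "")]
  | [u, t] =>
    let tens := if grp == 0 && count_of_zeros ≤ 60 then alternativeTenNumberName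
                else tblGet latinTensName t
    [(tblGet latinDigitPrefix u ++ tens) ++
       (if grp > 0 then tblGet latinThousandsName (if u == 0 then 1 else u) else "")]
  | u :: t :: h :: rest =>
    let tens := if grp == 0 && count_of_zeros ≤ 60 then alternativeTenNumberName
                else tblGet latinTensName t
    ((tblGet latinHundredsNames h ++ (tblGet latinDigitPrefix u ++ tens)) ++
       (if grp > 0 then tblGet latinThousandsName (if u == 0 then 1 else u) else ""))
      :: bPieces count_of_zeros (grp + 1) rest

def number_name_assemble_alt (count_of_zeros : Int) : String :=
  match PySem.Dict.get? uniqueNumbers count_of_zeros with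
  | some v => v
  | none =>
    let digits := ((PySem.Int.toChars (PySem.Int.floordiv (count_of_zeros - 3) 3)).reverse).map digitVal
    String.join ((bPieces count_of_zeros 0 digits).reverse) ++ "illion"

-- ===== PRECONDITION & SPEC =====
-- Pre_ excludes negative inputs: there str((count_of_zeros-3)/3) starts with '-' and
-- int('-') raises ValueError in A (and in B alike).
def Pre_number_name_assemble (count_of_zeros : Int) : Prop := 0 ≤ count_of_zeros
instance (count_of_zeros : Int) : Decidable (Pre_number_name_assemble count_of_zeros) := by
  unfold Pre_number_name_assemble; infer_instance

def pvWitness_number_name_assemble : Int := 33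

def Spec_number_name_assemble (count_of_zeros : Int) (out : String) : Prop := out = number_name_assemble_alt count_of_zeros
instance (count_of_zeros : Int) (out : String) : Decidable (Spec_number_name_assemble count_of_zeros out) := by unfold Spec_number_name_assemble; infer_instance

-- ===== CLAIM (what is proved, stated in full; the proofs are below) =====
def Claim_equal_number_name_assemble : Prop := ∀ (count_of_zeros : Int), Dom_number_name_assemble count_of_zeros → Pre_number_name_assemble count_of_zeros → Spec_number_name_assemble count_of_zeros (number_name_assemble count_of_zeros)

-- ===== LEMMAS AND PROOFS =====

-- A's loop started at a group boundary (iteration = 3*grp, any carried prev) produces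
-- exactly B's pieces of the same digits, concatenated most-significant group first.
theorem aLoop_eq_bPieces (c : Int) :
    (cs : List Char) → (grp : Nat) → (prev : Int) → (out : String) →
    aLoop c cs (3 * (grp : Int)) prev out =
      String.join ((bPieces c grp (cs.map digitVal)).reverse) ++ out
  | [], g, p, o => by simp [aLoop, bPieces, String.join]
  | [a], g, p, o => by
    by_cases hg : g = 0
    · subst hg; simp [aLoop, bPieces, String.join]
    · have hg' : 0 < g := Nat.pos_of_ne_zero hg
      by_cases hz : digitVal a = 0 <;>
        simp [aLoop, bPieces, hz, hg', String.join,
          show (3*(g:Int)+1) % 3 = 1 from by omega,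
          show (1:Int) < 3*(g:Int)+1 from by omega]
  | [a, b], g, p, o => by
    by_cases hg : g = 0
    · subst hg; simp [aLoop, bPieces, String.join, String.append_assoc]
    · have hg' : 0 < g := Nat.pos_of_ne_zero hg
      by_cases hz : digitVal a = 0 <;>
        simp [aLoop, bPieces, hz, hg, hg', String.join, String.append_assoc,
          show (3*(g:Int)+1) % 3 = 1 from by omega,
          show (3*(g:Int)+1+1) % 3 = 2 from by omega,
          show (1:Int) < 3*(g:Int)+1 from by omega,
          show ¬((3:Int)*(g:Int)+1+1 = 2) from by omega]
  | a :: b :: d :: rest, g, p, o => by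
    have hrec : ∀ o' : String, aLoop c rest (3 * (g : Int) + 1 + 1 + 1) (digitVal d) o' =
        String.join ((bPieces c (g + 1) (rest.map digitVal)).reverse) ++ o' := by
      intro o'
      rw [show (3 * (g : Int) + 1 + 1 + 1) = 3 * (((g + 1 : Nat)) : Int) by push_cast; ring]
      exact aLoop_eq_bPieces c rest (g + 1) (digitVal d) o'
    have hjoin : ∀ (L : List String) (x : String),
        String.join (L ++ [x]) = String.join L ++ x := by
      intro L x; simp [String.join, List.foldl_append]
    by_cases hg : g = 0
    · subst hg
      have hrec0 : ∀ o' : String, aLoop c rest 3 (digitVal d) o' =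
          String.join ((bPieces c 1 (rest.map digitVal)).reverse) ++ o' := by
        intro o'
        have := aLoop_eq_bPieces c rest 1 (digitVal d) o'
        simpa using this
      simp [aLoop, bPieces, hrec0, hjoin, String.append_assoc]
    · have hg' : 0 < g := Nat.pos_of_ne_zero hg
      by_cases hz : digitVal a = 0 <;>
        simp [aLoop, bPieces, hrec, hjoin, hz, hg, hg', String.append_assoc,
          show (3*(g:Int)+1) % 3 = 1 from by omega,
          show (3*(g:Int)+1+1) % 3 = 2 from by omega,
          show (3*(g:Int)+1+1+1) % 3 = 0 from by omega,
          show (1:Int) < 3*(g:Int)+1 from by omega,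
          show ¬((3:Int)*(g:Int)+1+1 = 2) from by omega]

-- ===== VERDICT (by name: the statement is the Claim_ definition above) =====
theorem number_name_assemble_spec : Claim_equal_number_name_assemble := by
  intro c _ _
  unfold Spec_number_name_assemble number_name_assemble number_name_assemble_alt
  cases h : PySem.Dict.get? uniqueNumbers c with
  | some v => rfl
  | none =>
    simp only []
    have := aLoop_eq_bPieces c
      ((PySem.Int.toChars (PySem.Int.floordiv (c - 3) 3)).reverse) 0 0 ""
    simpa [String.append_empty] using congrArg (· ++ "illion") (by simpa using this)
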